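-- pv_equiv track=rewrite | github.com/hAkhter89/aps-project | chess.py | check_bishop
-- ===== SOURCE A (Python) =====
-- black_coords = [(0,0),(1,0),(2,0),(3,0),(4,0),(5,0),(6,0),(7,0),
--                 (0,1),(1,1),(2,1),(3,1),(4,1),(5,1),(6,1),(7,1)]
--
-- white_coords = [(0,7),(1,7),(2,7),(3,7),(4,7),(5,7),(6,7),(7,7),
--                 (0,6),(1,6),(2,6),(3,6),(4,6),(5,6),(6,6),(7,6)]
--
-- def check_bishop(position, color):
--     moves_list = []
--     # if the current x sqare is 5 then the moves to the left will be x in range(1, 5 + 1) and moves to the right of the 5 squares will also need to be considered separetly, i.e x in range(1, abs(5-7(7 is the total board lenght) + 1))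
--     # all the moves are made diaganoly hence x coordinate + 1, y coordinate - 1 and these combinations, this will also be done for diagnol moves in the other 2 directions i.e top down, so if y coord is 5, x in range(1, 5 + 1)..., we're not concernced with their being more moves then squares becuase the board is lociked at 800x800
--     if color == 'white':
--         # TOP LEFT
--         for x in range(1, position[0] + 1):
--             if (position[0] - x, position[1] - x) not in white_coords:
--                 if (position[0] - x, position[1] - x) in black_coords:
--                     moves_list.append((position[0] - x, position[1] - x))
--                     break
--                 else:
--                     moves_list.append((position[0] - x, position[1] - x))
--             else:
--                 break
--         # DOWN RIGHT
--         for x in range(1, abs(position[0] - 7) + 1):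
--             if (position[0] + x, position[1] + x) not in white_coords:
--                 if (position[0] + x, position[1] + x) in black_coords:
--                     moves_list.append((position[0] + x, position[1] + x))
--                     break
--                 else:
--                     moves_list.append((position[0] + x, position[1] + x))
--             else:
--                 break
--         # DOWN LEFT
--         for x in range(1, position[0] + 1):
--             if (position[0] - x, position[1] + x) not in white_coords:
--                 if (position[0] - x, position[1] + x) in black_coords:
--                     moves_list.append((position[0] - x, position[1] + x))
--                     break
--                 else:
--                     moves_list.append((position[0] - x, position[1] + x))
--             else:
--                 break
--         #  UP RIGHT
--         for x in range(1, abs(position[0] - 7) + 1):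
--             if (position[0] + x, position[1] - x) not in white_coords:
--                 if (position[0] + x, position[1] - x) in black_coords:
--                     moves_list.append((position[0] + x, position[1] - x))
--                     break
--                 else:
--                     moves_list.append((position[0] + x, position[1] - x))
--             else:
--                 break
--     else:
--         # FOR BLACK
--         for x in range(1, abs(position[0] - 7) + 1):
--             if (position[0] + x, position[1] + x) not in black_coords:
--                 if (position[0] + x, position[1] + x) in white_coords:
--                     moves_list.append((position[0] + x, position[1] + x))
--                     break
--                 else:
--                     moves_list.append((position[0] + x, position[1] + x))
--             else:
--                 break
--         for x in range(1, position[0]  + 1):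
--             if (position[0] - x, position[1] - x) not in black_coords:
--                 if (position[0] - x, position[1] - x) in white_coords:
--                     moves_list.append((position[0] - x, position[1] - x))
--                     break
--                 else:
--                     moves_list.append((position[0] - x, position[1] - x))
--             else:
--                 break
--         for x in range(1, abs(position[0] - 7) + 1):
--             if (position[0] + x, position[1] - x) not in black_coords:
--                 if (position[0] + x, position[1] - x) in white_coords:
--                     moves_list.append((position[0] + x, position[1] - x))
--                     break
--                 else:
--                     moves_list.append((position[0] + x, position[1] - x))
--             else:
--                 break
--         for x in range(1, position[0] + 1):
--             if (position[0] - x, position[1] + x) not in black_coords: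
--                 if (position[0] - x, position[1] + x) in white_coords:
--                     moves_list.append((position[0] - x, position[1] + x))
--                     break
--                 else:
--                     moves_list.append((position[0] - x, position[1] + x))
--             else:
--                 break
--     return moves_list
-- ===== SOURCE B (Python) =====
-- black_coords = [(0,0),(1,0),(2,0),(3,0),(4,0),(5,0),(6,0),(7,0),
--                 (0,1),(1,1),(2,1),(3,1),(4,1),(5,1),(6,1),(7,1)]
--
-- white_coords = [(0,7),(1,7),(2,7),(3,7),(4,7),(5,7),(6,7),(7,7),
--                 (0,6),(1,6),(2,6),(3,6),(4,6),(5,6),(6,6),(7,6)]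
--
--
-- def _first_hit(px, py, dx, dy, rows):
--     # Smallest step x >= 1 at which the ray lands on an occupied square of the
--     # given piece band (rows = the band's two y-rows, pieces fill columns 0..7).
--     # Solved arithmetically: the step hitting row r is x = dy * (r - py).
--     best = None
--     for r in rows:
--         x = dy * (r - py)
--         if x >= 1 and 0 <= px + dx * x <= 7:
--             if best is None or x < best:
--                 best = x
--     return best
--
--
-- def _ray(px, py, dx, dy, own_rows, enemy_rows):
--     bound = px + 1 if dx == -1 else abs(px - 7) + 1
--     own = _first_hit(px, py, dx, dy, own_rows)
--     enemy = _first_hit(px, py, dx, dy, enemy_rows)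
--     limit = bound if own is None or own > bound else own
--     if enemy is not None and enemy < limit:
--         limit = enemy + 1
--     return [(px + dx * x, py + dy * x) for x in range(1, limit)]
--
--
-- def check_bishop(position, color):
--     px, py = position[0], position[1]
--     if color == 'white':
--         dirs, own_rows, enemy_rows = [(-1, -1), (1, 1), (-1, 1), (1, -1)], [6, 7], [0, 1]
--     else:
--         dirs, own_rows, enemy_rows = [(1, 1), (-1, -1), (1, -1), (-1, 1)], [0, 1], [6, 7]
--     moves = []
--     for dx, dy in dirs:
--         moves.extend(_ray(px, py, dx, dy, own_rows, enemy_rows))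
--     return moves
-- ===== Notes on version B (the rewrite author's own statement) =====
-- stated objective: alternative
-- what changed: Instead of A's per-square membership scan with break along each diagonal, B solves arithmetically for the first step at which each ray enters the two occupied back-rank rows (own and enemy bands), derives the ray's cutoff in closed form, and emits the moves as a single range map.
import Mathlib
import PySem

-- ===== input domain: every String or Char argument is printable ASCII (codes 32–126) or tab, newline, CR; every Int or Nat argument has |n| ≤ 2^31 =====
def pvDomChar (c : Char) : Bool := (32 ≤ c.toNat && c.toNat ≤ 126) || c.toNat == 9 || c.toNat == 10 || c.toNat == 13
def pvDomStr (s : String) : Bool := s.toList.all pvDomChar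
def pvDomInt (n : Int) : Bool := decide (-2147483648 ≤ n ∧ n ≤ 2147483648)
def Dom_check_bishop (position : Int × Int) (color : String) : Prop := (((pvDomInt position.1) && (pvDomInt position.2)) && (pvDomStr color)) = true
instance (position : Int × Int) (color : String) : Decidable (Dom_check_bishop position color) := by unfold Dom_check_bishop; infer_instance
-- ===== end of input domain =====

-- B replaces A's per-square membership scanning with break by an arithmetic closed-form
-- cutoff per diagonal (first step entering each occupied two-row band), then a range map
-- (objective: alternative algorithm).

def black_coords : List (Int × Int) := [(0,0),(1,0),(2,0),(3,0),(4,0),(5,0),(6,0),(7,0),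
  (0,1),(1,1),(2,1),(3,1),(4,1),(5,1),(6,1),(7,1)]

def white_coords : List (Int × Int) := [(0,7),(1,7),(2,7),(3,7),(4,7),(5,7),(6,7),(7,7),
  (0,6),(1,6),(2,6),(3,6),(4,6),(5,6),(6,6),(7,6)]

-- ===== PORT A =====
-- A's eight textually-unrolled for-loops, one recursion each over its range; `break` = stop consuming the range.
def aWhiteTL (p : Int × Int) : List Int → List (Int × Int)
  | [] => []
  | x :: xs =>
    if ¬ white_coords.contains (p.1 - x, p.2 - x) then
      if black_coords.contains (p.1 - x, p.2 - x) then [(p.1 - x, p.2 - x)]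
      else (p.1 - x, p.2 - x) :: aWhiteTL p xs
    else []

def aWhiteDR (p : Int × Int) : List Int → List (Int × Int)
  | [] => []
  | x :: xs =>
    if ¬ white_coords.contains (p.1 + x, p.2 + x) then
      if black_coords.contains (p.1 + x, p.2 + x) then [(p.1 + x, p.2 + x)]
      else (p.1 + x, p.2 + x) :: aWhiteDR p xs
    else []

def aWhiteDL (p : Int × Int) : List Int → List (Int × Int)
  | [] => []
  | x :: xs =>
    if ¬ white_coords.contains (p.1 - x, p.2 + x) then
      if black_coords.contains (p.1 - x, p.2 + x) then [(p.1 - x, p.2 + x)]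
      else (p.1 - x, p.2 + x) :: aWhiteDL p xs
    else []

def aWhiteUR (p : Int × Int) : List Int → List (Int × Int)
  | [] => []
  | x :: xs =>
    if ¬ white_coords.contains (p.1 + x, p.2 - x) then
      if black_coords.contains (p.1 + x, p.2 - x) then [(p.1 + x, p.2 - x)]
      else (p.1 + x, p.2 - x) :: aWhiteUR p xs
    else []

def aBlackDR (p : Int × Int) : List Int → List (Int × Int)
  | [] => []
  | x :: xs =>
    if ¬ black_coords.contains (p.1 + x, p.2 + x) then
      if white_coords.contains (p.1 + x, p.2 + x) then [(p.1 + x, p.2 + x)]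
      else (p.1 + x, p.2 + x) :: aBlackDR p xs
    else []

def aBlackTL (p : Int × Int) : List Int → List (Int × Int)
  | [] => []
  | x :: xs =>
    if ¬ black_coords.contains (p.1 - x, p.2 - x) then
      if white_coords.contains (p.1 - x, p.2 - x) then [(p.1 - x, p.2 - x)]
      else (p.1 - x, p.2 - x) :: aBlackTL p xs
    else []

def aBlackUR (p : Int × Int) : List Int → List (Int × Int)
  | [] => []
  | x :: xs =>
    if ¬ black_coords.contains (p.1 + x, p.2 - x) then
      if white_coords.contains (p.1 + x, p.2 - x) then [(p.1 + x, p.2 - x)]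
      else (p.1 + x, p.2 - x) :: aBlackUR p xs
    else []

def aBlackDL (p : Int × Int) : List Int → List (Int × Int)
  | [] => []
  | x :: xs =>
    if ¬ black_coords.contains (p.1 - x, p.2 + x) then
      if white_coords.contains (p.1 - x, p.2 + x) then [(p.1 - x, p.2 + x)]
      else (p.1 - x, p.2 + x) :: aBlackDL p xs
    else []

def check_bishop (position : Int × Int) (color : String) : List (Int × Int) :=
  if color == "white" then
    aWhiteTL position (PySem.List.pyRange 1 (position.1 + 1) 1)
      ++ aWhiteDR position (PySem.List.pyRange 1 (|position.1 - 7| + 1) 1)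
      ++ aWhiteDL position (PySem.List.pyRange 1 (position.1 + 1) 1)
      ++ aWhiteUR position (PySem.List.pyRange 1 (|position.1 - 7| + 1) 1)
  else
    aBlackDR position (PySem.List.pyRange 1 (|position.1 - 7| + 1) 1)
      ++ aBlackTL position (PySem.List.pyRange 1 (position.1 + 1) 1)
      ++ aBlackUR position (PySem.List.pyRange 1 (|position.1 - 7| + 1) 1)
      ++ aBlackDL position (PySem.List.pyRange 1 (position.1 + 1) 1)

-- ===== PORT B =====
-- _first_hit: smallest step x >= 1 landing on the band (rows = its two y-rows, columns 0..7),
-- solved arithmetically: the step hitting row r is x = dy * (r - py).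
def firstHit (px py dx dy : Int) (rows : List Int) : Option Int :=
  rows.foldl (fun best r =>
    let x := dy * (r - py)
    if 1 ≤ x ∧ 0 ≤ px + dx * x ∧ px + dx * x ≤ 7 then
      match best with
      | none => some x
      | some b => if x < b then some x else best
    else best) none

-- _ray: closed-form cutoff, then emit the moves as a range map.
def bRay (px py dx dy : Int) (ownRows enemyRows : List Int) : List (Int × Int) :=
  let bound := if dx == -1 then px + 1 else |px - 7| + 1
  let own := firstHit px py dx dy ownRows
  let enemy := firstHit px py dx dy enemyRows
  let limit1 := match own with | none => bound | some o => if o > bound then bound else o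
  let limit := match enemy with | none => limit1 | some e => if e < limit1 then e + 1 else limit1
  (PySem.List.pyRange 1 limit 1).map (fun x => (px + dx * x, py + dy * x))

def check_bishop_alt (position : Int × Int) (color : String) : List (Int × Int) :=
  let px := position.1
  let py := position.2
  let cfg : List (Int × Int) × List Int × List Int :=
    if color == "white" then ([(-1,-1),(1,1),(-1,1),(1,-1)], [6,7], [0,1])
    else ([(1,1),(-1,-1),(1,-1),(-1,1)], [0,1], [6,7])
  cfg.1.foldl (fun acc d => acc ++ bRay px py d.1 d.2 cfg.2.1 cfg.2.2) []

-- ===== PRECONDITION & SPEC =====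
def Spec_check_bishop (position : Int × Int) (color : String) (out : List (Int × Int)) : Prop := out = check_bishop_alt position color
instance (position : Int × Int) (color : String) (out : List (Int × Int)) : Decidable (Spec_check_bishop position color out) := by unfold Spec_check_bishop; infer_instance

-- ===== CLAIM =====
def Claim_equal_check_bishop : Prop := ∀ (position : Int × Int) (color : String), Dom_check_bishop position color → Spec_check_bishop position color (check_bishop position color)

-- ===== LEMMAS AND PROOFS =====

-- generic ray scan: common shape of A's eight unrolled loops
def scanRay (px py dx dy : Int) (own enemy : List (Int × Int)) : List Int → List (Int × Int)
  | [] => []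
  | x :: xs =>
    if own.contains (px + dx * x, py + dy * x) then []
    else if enemy.contains (px + dx * x, py + dy * x) then [(px + dx * x, py + dy * x)]
    else (px + dx * x, py + dy * x) :: scanRay px py dx dy own enemy xs

theorem walk_aWhiteTL (p : Int × Int) (r : List Int) : scanRay p.1 p.2 (-1) (-1) white_coords black_coords r = aWhiteTL p r := by
  induction r with
  | nil => rfl
  | cons x xs ih => simp only [scanRay, aWhiteTL, neg_one_mul, ← sub_eq_add_neg, ih]; split_ifs <;> simp_all

theorem walk_aWhiteDR (p : Int × Int) (r : List Int) : scanRay p.1 p.2 1 1 white_coords black_coords r = aWhiteDR p r := by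
  induction r with
  | nil => rfl
  | cons x xs ih => simp only [scanRay, aWhiteDR, one_mul, ih]; split_ifs <;> simp_all

theorem walk_aWhiteDL (p : Int × Int) (r : List Int) : scanRay p.1 p.2 (-1) 1 white_coords black_coords r = aWhiteDL p r := by
  induction r with
  | nil => rfl
  | cons x xs ih => simp only [scanRay, aWhiteDL, neg_one_mul, one_mul, ← sub_eq_add_neg, ih]; split_ifs <;> simp_all

theorem walk_aWhiteUR (p : Int × Int) (r : List Int) : scanRay p.1 p.2 1 (-1) white_coords black_coords r = aWhiteUR p r := by
  induction r with
  | nil => rfl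
  | cons x xs ih => simp only [scanRay, aWhiteUR, neg_one_mul, one_mul, ← sub_eq_add_neg, ih]; split_ifs <;> simp_all

theorem walk_aBlackDR (p : Int × Int) (r : List Int) : scanRay p.1 p.2 1 1 black_coords white_coords r = aBlackDR p r := by
  induction r with
  | nil => rfl
  | cons x xs ih => simp only [scanRay, aBlackDR, one_mul, ih]; split_ifs <;> simp_all

theorem walk_aBlackTL (p : Int × Int) (r : List Int) : scanRay p.1 p.2 (-1) (-1) black_coords white_coords r = aBlackTL p r := by
  induction r with
  | nil => rfl
  | cons x xs ih => simp only [scanRay, aBlackTL, neg_one_mul, ← sub_eq_add_neg, ih]; split_ifs <;> simp_all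

theorem walk_aBlackUR (p : Int × Int) (r : List Int) : scanRay p.1 p.2 1 (-1) black_coords white_coords r = aBlackUR p r := by
  induction r with
  | nil => rfl
  | cons x xs ih => simp only [scanRay, aBlackUR, neg_one_mul, one_mul, ← sub_eq_add_neg, ih]; split_ifs <;> simp_all

theorem walk_aBlackDL (p : Int × Int) (r : List Int) : scanRay p.1 p.2 (-1) 1 black_coords white_coords r = aBlackDL p r := by
  induction r with
  | nil => rfl
  | cons x xs ih => simp only [scanRay, aBlackDL, neg_one_mul, one_mul, ← sub_eq_add_neg, ih]; split_ifs <;> simp_all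

-- occupied-band membership, characterised arithmetically
theorem mem_black (a b : Int) : black_coords.contains (a, b) = true ↔ (0 ≤ a ∧ a ≤ 7 ∧ (b = 0 ∨ b = 1)) := by
  simp [black_coords, Prod.ext_iff]; omega

theorem mem_white (a b : Int) : white_coords.contains (a, b) = true ↔ (0 ≤ a ∧ a ≤ 7 ∧ (b = 6 ∨ b = 7)) := by
  simp [white_coords, Prod.ext_iff]; omega

-- a ray square lies in a band iff its step is one of the two solved candidate steps with the column in range
theorem hit_iff (px py dx dy x r0 r1 : Int) (S : List (Int × Int))
    (hdy : dy = 1 ∨ dy = -1)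
    (hmem : ∀ a b : Int, S.contains (a, b) = true ↔ (0 ≤ a ∧ a ≤ 7 ∧ (b = r0 ∨ b = r1))) :
    S.contains (px + dx * x, py + dy * x) = true ↔
      ((x = dy * (r0 - py) ∨ x = dy * (r1 - py)) ∧ 0 ≤ px + dx * x ∧ px + dx * x ≤ 7) := by
  rw [hmem]
  rcases hdy with rfl | rfl <;> simp only [one_mul, neg_one_mul] <;>
    (generalize px + dx * x = c) <;> omega

-- closed form of firstHit on a two-row band
theorem firstHit_eq (px py dx dy r0 r1 : Int) :
    firstHit px py dx dy [r0, r1] =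
      (if 1 ≤ dy * (r0 - py) ∧ 0 ≤ px + dx * (dy * (r0 - py)) ∧ px + dx * (dy * (r0 - py)) ≤ 7 then
        (if 1 ≤ dy * (r1 - py) ∧ 0 ≤ px + dx * (dy * (r1 - py)) ∧ px + dx * (dy * (r1 - py)) ≤ 7 then
          (if dy * (r1 - py) < dy * (r0 - py) then some (dy * (r1 - py)) else some (dy * (r0 - py)))
        else some (dy * (r0 - py)))
      else (if 1 ≤ dy * (r1 - py) ∧ 0 ≤ px + dx * (dy * (r1 - py)) ∧ px + dx * (dy * (r1 - py)) ≤ 7 then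
        some (dy * (r1 - py)) else none)) := by
  simp only [firstHit, List.foldl]
  split_ifs <;> simp_all

theorem firstHit_min (px py dx dy r0 r1 h : Int) (S : List (Int × Int))
    (hdy : dy = 1 ∨ dy = -1)
    (hmem : ∀ a b : Int, S.contains (a, b) = true ↔ (0 ≤ a ∧ a ≤ 7 ∧ (b = r0 ∨ b = r1)))
    (hfh : firstHit px py dx dy [r0, r1] = some h) :
    1 ≤ h ∧ S.contains (px + dx * h, py + dy * h) = true ∧
      ∀ x : Int, 1 ≤ x → S.contains (px + dx * x, py + dy * x) = true → h ≤ x := by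
  rw [firstHit_eq] at hfh
  have hc := fun x => hit_iff px py dx dy x r0 r1 S hdy hmem
  split_ifs at hfh with h0 h1 h2 h3 <;>
    (try cases hfh) <;>
    refine ⟨by omega, (hc _).mpr ⟨by tauto, by tauto⟩, ?_⟩ <;>
    · intro x hx hcx
      obtain ⟨hx01, hcol⟩ := (hc x).mp hcx
      rcases hx01 with rfl | rfl <;> omega

theorem firstHit_none (px py dx dy r0 r1 : Int) (S : List (Int × Int))
    (hdy : dy = 1 ∨ dy = -1)
    (hmem : ∀ a b : Int, S.contains (a, b) = true ↔ (0 ≤ a ∧ a ≤ 7 ∧ (b = r0 ∨ b = r1)))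
    (hfh : firstHit px py dx dy [r0, r1] = none) :
    ∀ x : Int, 1 ≤ x → S.contains (px + dx * x, py + dy * x) = false := by
  rw [firstHit_eq] at hfh
  have hc := fun x => hit_iff px py dx dy x r0 r1 S hdy hmem
  intro x hx
  split_ifs at hfh
  cases hb : S.contains (px + dx * x, py + dy * x)
  · rfl
  · exfalso
    obtain ⟨hx01, hcol⟩ := (hc x).mp hb
    rcases hx01 with rfl | rfl <;> omega

-- scan over a stretch with no occupied square = plain map
theorem scan_clean (px py dx dy : Int) (own enemy : List (Int × Int)) :
    ∀ l : List Int,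
      (∀ x ∈ l, own.contains (px + dx * x, py + dy * x) = false ∧ enemy.contains (px + dx * x, py + dy * x) = false) →
      scanRay px py dx dy own enemy l = l.map (fun x => (px + dx * x, py + dy * x)) := by
  intro l
  induction l with
  | nil => intro _; rfl
  | cons x xs ih =>
    intro h
    have hx := h x (List.mem_cons_self)
    have hih := ih (fun y hy => h y (List.mem_cons_of_mem _ hy))
    simp only [scanRay, hx.1, hx.2, Bool.false_eq_true, if_false, hih, List.map_cons]

theorem scan_stop_own (px py dx dy : Int) (own enemy : List (Int × Int)) :
    ∀ (l1 : List Int) (x : Int) (l2 : List Int),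
      (∀ y ∈ l1, own.contains (px + dx * y, py + dy * y) = false ∧ enemy.contains (px + dx * y, py + dy * y) = false) →
      own.contains (px + dx * x, py + dy * x) = true →
      scanRay px py dx dy own enemy (l1 ++ x :: l2) = l1.map (fun y => (px + dx * y, py + dy * y)) := by
  intro l1
  induction l1 with
  | nil => intro x l2 _ hx; simp only [List.nil_append, scanRay, hx, if_true, List.map_nil]
  | cons y ys ih =>
    intro x l2 h hx
    have hy := h y (List.mem_cons_self)
    have hih := ih x l2 (fun z hz => h z (List.mem_cons_of_mem _ hz)) hx
    simp only [List.cons_append, scanRay, hy.1, hy.2, Bool.false_eq_true, if_false, hih, List.map_cons]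

theorem scan_stop_enemy (px py dx dy : Int) (own enemy : List (Int × Int)) :
    ∀ (l1 : List Int) (x : Int) (l2 : List Int),
      (∀ y ∈ l1, own.contains (px + dx * y, py + dy * y) = false ∧ enemy.contains (px + dx * y, py + dy * y) = false) →
      own.contains (px + dx * x, py + dy * x) = false →
      enemy.contains (px + dx * x, py + dy * x) = true →
      scanRay px py dx dy own enemy (l1 ++ x :: l2) =
        l1.map (fun y => (px + dx * y, py + dy * y)) ++ [(px + dx * x, py + dy * x)] := by
  intro l1
  induction l1 with
  | nil =>
    intro x l2 _ hox hex
    simp only [List.nil_append, scanRay, hox, hex, Bool.false_eq_true, if_false, if_true, List.map_nil]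
  | cons y ys ih =>
    intro x l2 h hox hex
    have hy := h y (List.mem_cons_self)
    have hih := ih x l2 (fun z hz => h z (List.mem_cons_of_mem _ hz)) hox hex
    simp only [List.cons_append, scanRay, hy.1, hy.2, Bool.false_eq_true, if_false, hih, List.map_cons]

-- the core: A's scan over one diagonal equals B's closed-form ray
theorem ray_eq (px py dx dy B o0 o1 e0 e1 : Int) (own enemy : List (Int × Int))
    (hdy : dy = 1 ∨ dy = -1)
    (hB : (if dx == -1 then px + 1 else |px - 7| + 1) = B)
    (hown : ∀ a b : Int, own.contains (a, b) = true ↔ (0 ≤ a ∧ a ≤ 7 ∧ (b = o0 ∨ b = o1)))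
    (henemy : ∀ a b : Int, enemy.contains (a, b) = true ↔ (0 ≤ a ∧ a ≤ 7 ∧ (b = e0 ∨ b = e1))) :
    scanRay px py dx dy own enemy (PySem.List.pyRange 1 B 1) = bRay px py dx dy [o0, o1] [e0, e1] := by
  simp only [bRay, hB]
  cases hO : firstHit px py dx dy [o0, o1] with
  | none =>
    have hOn := firstHit_none px py dx dy o0 o1 own hdy hown hO
    cases hE : firstHit px py dx dy [e0, e1] with
    | none =>
      have hEn := firstHit_none px py dx dy e0 e1 enemy hdy henemy hE
      exact scan_clean px py dx dy own enemy _ (fun x hx => by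
        rw [PySem.List.mem_pyRange_one] at hx
        exact ⟨hOn x hx.1, hEn x hx.1⟩)
    | some e =>
      obtain ⟨he1, heHit, heMin⟩ := firstHit_min px py dx dy e0 e1 e enemy hdy henemy hE
      by_cases hcap : e < B
      · simp only [hcap, if_pos]
        rw [PySem.List.pyRange_one_append 1 e B he1 (by omega),
            PySem.List.pyRange_one_cons hcap]
        have hclean : ∀ x ∈ PySem.List.pyRange 1 e 1,
            own.contains (px + dx * x, py + dy * x) = false ∧ enemy.contains (px + dx * x, py + dy * x) = false := by
          intro x hx
          rw [PySem.List.mem_pyRange_one] at hx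
          refine ⟨hOn x hx.1, ?_⟩
          cases hb : enemy.contains (px + dx * x, py + dy * x)
          · rfl
          · exact absurd (heMin x hx.1 hb) (by omega)
        rw [scan_stop_enemy px py dx dy own enemy _ e _ hclean (hOn e he1) heHit]
        rw [show e + 1 = e + 1 from rfl, PySem.List.pyRange_one_succ_right he1]
        simp
      · simp only [hcap, if_false]
        exact scan_clean px py dx dy own enemy _ (fun x hx => by
          rw [PySem.List.mem_pyRange_one] at hx
          refine ⟨hOn x hx.1, ?_⟩
          cases hb : enemy.contains (px + dx * x, py + dy * x)
          · rfl
          · exact absurd (heMin x hx.1 hb) (by omega))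
  | some o =>
    obtain ⟨ho1, hoHit, hoMin⟩ := firstHit_min px py dx dy o0 o1 o own hdy hown hO
    -- limit1 = if o > B then B else o
    by_cases hoB : o > B
    · simp only [hoB, if_pos]
      -- limit1 = B; own never hit below B
      have hOno : ∀ x : Int, 1 ≤ x → x < B → own.contains (px + dx * x, py + dy * x) = false := by
        intro x hx hxB
        cases hb : own.contains (px + dx * x, py + dy * x)
        · rfl
        · exact absurd (hoMin x hx hb) (by omega)
      cases hE : firstHit px py dx dy [e0, e1] with
      | none =>
        have hEn := firstHit_none px py dx dy e0 e1 enemy hdy henemy hE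
        exact scan_clean px py dx dy own enemy _ (fun x hx => by
          rw [PySem.List.mem_pyRange_one] at hx
          exact ⟨hOno x hx.1 hx.2, hEn x hx.1⟩)
      | some e =>
        obtain ⟨he1, heHit, heMin⟩ := firstHit_min px py dx dy e0 e1 e enemy hdy henemy hE
        by_cases hcap : e < B
        · simp only [hcap, if_pos]
          rw [PySem.List.pyRange_one_append 1 e B he1 (by omega),
              PySem.List.pyRange_one_cons hcap]
          have hclean : ∀ x ∈ PySem.List.pyRange 1 e 1,
              own.contains (px + dx * x, py + dy * x) = false ∧ enemy.contains (px + dx * x, py + dy * x) = false := by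
            intro x hx
            rw [PySem.List.mem_pyRange_one] at hx
            refine ⟨hOno x hx.1 (by omega), ?_⟩
            cases hb : enemy.contains (px + dx * x, py + dy * x)
            · rfl
            · exact absurd (heMin x hx.1 hb) (by omega)
          rw [scan_stop_enemy px py dx dy own enemy _ e _ hclean (hOno e he1 hcap) heHit]
          rw [PySem.List.pyRange_one_succ_right he1]
          simp
        · simp only [hcap, if_false]
          exact scan_clean px py dx dy own enemy _ (fun x hx => by
            rw [PySem.List.mem_pyRange_one] at hx
            refine ⟨hOno x hx.1 hx.2, ?_⟩
            cases hb : enemy.contains (px + dx * x, py + dy * x)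
            · rfl
            · exact absurd (heMin x hx.1 hb) (by omega))
    · simp only [hoB, if_false]
      -- limit1 = o ≤ B
      have hOno : ∀ x : Int, 1 ≤ x → x < o → own.contains (px + dx * x, py + dy * x) = false := by
        intro x hx hxo
        cases hb : own.contains (px + dx * x, py + dy * x)
        · rfl
        · exact absurd (hoMin x hx hb) (by omega)
      cases hE : firstHit px py dx dy [e0, e1] with
      | none =>
        have hEn := firstHit_none px py dx dy e0 e1 enemy hdy henemy hE
        by_cases hoBeq : o < B
        · rw [PySem.List.pyRange_one_append 1 o B ho1 (by omega),
              PySem.List.pyRange_one_cons hoBeq]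
          exact scan_stop_own px py dx dy own enemy _ o _ (fun x hx => by
            rw [PySem.List.mem_pyRange_one] at hx
            exact ⟨hOno x hx.1 hx.2, hEn x hx.1⟩) hoHit
        · -- o = B
          have hoB' : o = B := by omega
          subst hoB'
          exact scan_clean px py dx dy own enemy _ (fun x hx => by
            rw [PySem.List.mem_pyRange_one] at hx
            exact ⟨hOno x hx.1 hx.2, hEn x hx.1⟩)
      | some e =>
        obtain ⟨he1, heHit, heMin⟩ := firstHit_min px py dx dy e0 e1 e enemy hdy henemy hE
        have hEno : ∀ x : Int, 1 ≤ x → x < e → enemy.contains (px + dx * x, py + dy * x) = false := by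
          intro x hx hxe
          cases hb : enemy.contains (px + dx * x, py + dy * x)
          · rfl
          · exact absurd (heMin x hx hb) (by omega)
        by_cases hcap : e < o
        · simp only [hcap, if_pos]
          rw [PySem.List.pyRange_one_append 1 e B he1 (by omega),
              PySem.List.pyRange_one_cons (show e < B by omega)]
          rw [scan_stop_enemy px py dx dy own enemy _ e _ (fun x hx => by
              rw [PySem.List.mem_pyRange_one] at hx
              exact ⟨hOno x hx.1 (by omega), hEno x hx.1 hx.2⟩) (hOno e he1 hcap) heHit]
          rw [PySem.List.pyRange_one_succ_right he1]
          simp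
        · simp only [hcap, if_false]
          by_cases hoBeq : o < B
          · rw [PySem.List.pyRange_one_append 1 o B ho1 (by omega),
                PySem.List.pyRange_one_cons hoBeq]
            exact scan_stop_own px py dx dy own enemy _ o _ (fun x hx => by
              rw [PySem.List.mem_pyRange_one] at hx
              exact ⟨hOno x hx.1 hx.2, hEno x hx.1 (by omega)⟩) hoHit
          · have hoB' : o = B := by omega
            subst hoB'
            exact scan_clean px py dx dy own enemy _ (fun x hx => by
              rw [PySem.List.mem_pyRange_one] at hx
              exact ⟨hOno x hx.1 hx.2, hEno x hx.1 (by omega)⟩)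

-- ===== VERDICT =====
theorem check_bishop_spec : Claim_equal_check_bishop := by
  intro position color _
  unfold Spec_check_bishop check_bishop check_bishop_alt
  by_cases h : color == "white"
  · simp only [h, if_pos, List.foldl, List.nil_append]
    rw [← walk_aWhiteTL, ← walk_aWhiteDR, ← walk_aWhiteDL, ← walk_aWhiteUR,
        ray_eq position.1 position.2 (-1) (-1) (position.1 + 1) 6 7 0 1 white_coords black_coords
          (Or.inr rfl) (by norm_num) mem_white mem_black,
        ray_eq position.1 position.2 1 1 (|position.1 - 7| + 1) 6 7 0 1 white_coords black_coords
          (Or.inl rfl) (by norm_num) mem_white mem_black,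
        ray_eq position.1 position.2 (-1) 1 (position.1 + 1) 6 7 0 1 white_coords black_coords
          (Or.inl rfl) (by norm_num) mem_white mem_black,
        ray_eq position.1 position.2 1 (-1) (|position.1 - 7| + 1) 6 7 0 1 white_coords black_coords
          (Or.inr rfl) (by norm_num) mem_white mem_black]
  · simp only [h, Bool.false_eq_true, if_false, List.foldl, List.nil_append]
    rw [← walk_aBlackDR, ← walk_aBlackTL, ← walk_aBlackUR, ← walk_aBlackDL,
        ray_eq position.1 position.2 1 1 (|position.1 - 7| + 1) 0 1 6 7 black_coords white_coords
          (Or.inl rfl) (by norm_num) mem_black mem_white,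
        ray_eq position.1 position.2 (-1) (-1) (position.1 + 1) 0 1 6 7 black_coords white_coords
          (Or.inr rfl) (by norm_num) mem_black mem_white,
        ray_eq position.1 position.2 1 (-1) (|position.1 - 7| + 1) 0 1 6 7 black_coords white_coords
          (Or.inr rfl) (by norm_num) mem_black mem_white,
        ray_eq position.1 position.2 (-1) 1 (position.1 + 1) 0 1 6 7 black_coords white_coords
          (Or.inl rfl) (by norm_num) mem_black mem_white]
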